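-- pv_equiv track=rewrite | github.com/sortedcord/nuCard | nucard/utils.py | match_property
-- ===== SOURCE A (Python) =====
-- def match_property(key, properties):
--     _ = []
--     for prop in properties:
--         if key == prop:
--             return prop
--         elif key in prop:
--             _.append(prop)
--     if _:
--         return _[0]
-- ===== SOURCE B (Python) =====
-- def match_property(key, properties):
--     props = list(properties)
--     for prop in props:
--         if key == prop:
--             return prop
--     for prop in props:
--         if key in prop:
--             return prop
--     return None
-- ===== Notes on version B (the rewrite author's own statement) =====
-- stated objective: simpler
-- what changed: Replaces A's single pass that accumulates substring matches in a list with two sequential early-return scans (exact match first, then first substring match), needing no intermediate list.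
import Mathlib
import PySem

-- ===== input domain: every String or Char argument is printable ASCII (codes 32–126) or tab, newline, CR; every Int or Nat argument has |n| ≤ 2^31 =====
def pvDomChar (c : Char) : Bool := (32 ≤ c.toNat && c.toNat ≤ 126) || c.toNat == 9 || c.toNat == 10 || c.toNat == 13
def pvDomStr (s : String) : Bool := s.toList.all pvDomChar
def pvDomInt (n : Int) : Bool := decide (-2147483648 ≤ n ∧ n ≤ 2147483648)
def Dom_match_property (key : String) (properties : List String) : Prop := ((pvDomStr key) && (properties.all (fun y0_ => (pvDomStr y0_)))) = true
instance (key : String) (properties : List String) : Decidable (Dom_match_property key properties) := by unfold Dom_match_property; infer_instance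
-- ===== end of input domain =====

-- B replaces A's single accumulating pass with two sequential early-return scans (exact, then substring); objective: simpler.


-- ===== PORT A =====
-- A's loop: scan properties, return on exact match, otherwise accumulate substring matches in `acc`;
-- after the loop, return acc[0] if acc is nonempty, else (implicit) None.
def matchPropLoopA (key : String) (props : List String) (acc : List String) : Option String :=
  match props with
  | [] => match acc with
          | [] => none
          | a :: _ => some a
  | p :: rest =>
      if key == p then some p
      else if PySem.Str.isIn key p then matchPropLoopA key rest (acc ++ [p])
      else matchPropLoopA key rest acc

def match_property (key : String) (properties : List String) : Option String :=
  matchPropLoopA key properties []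

-- ===== PORT B =====
-- B's first scan: first prop equal to key
def exactScan (key : String) (props : List String) : Option String :=
  match props with
  | [] => none
  | p :: rest => if key == p then some p else exactScan key rest

-- B's second scan: first prop containing key as a substring
def subScan (key : String) (props : List String) : Option String :=
  match props with
  | [] => none
  | p :: rest => if PySem.Str.isIn key p then some p else subScan key rest

def match_property_alt (key : String) (properties : List String) : Option String :=
  match exactScan key properties with
  | some p => some p
  | none => subScan key properties

-- ===== PRECONDITION & SPEC =====
def Spec_match_property (key : String) (properties : List String) (out : Option String) : Prop := out = match_property_alt key properties
instance (key : String) (properties : List String) (out : Option String) : Decidable (Spec_match_property key properties out) := by unfold Spec_match_property; infer_instance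

-- ===== CLAIM (what is proved, stated in full; the proofs are below) =====
def Claim_equal_match_property : Prop := ∀ (key : String) (properties : List String), Dom_match_property key properties → Spec_match_property key properties (match_property key properties)

-- ===== LEMMAS AND PROOFS =====

-- Loop invariant: A's loop equals exactScan, falling back to the head of the accumulator, falling back to subScan.
theorem matchPropLoopA_eq (key : String) (props : List String) :
    ∀ acc : List String,
      matchPropLoopA key props acc =
        match exactScan key props with
        | some p => some p
        | none => match acc with
                  | [] => subScan key props
                  | a :: _ => some a := by
  induction props with
  | nil => intro acc; cases acc <;> simp [matchPropLoopA, exactScan, subScan]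
  | cons p rest ih =>
    intro acc
    by_cases h : key == p
    · simp [matchPropLoopA, exactScan, h]
    · by_cases hin : PySem.Str.isIn key p
      · simp only [matchPropLoopA, exactScan, subScan, h, hin, if_neg, if_pos,
          Bool.false_eq_true, ite_false, ih]
        cases hex : exactScan key rest <;> cases acc <;> simp
      · simp only [matchPropLoopA, exactScan, subScan, h, hin, Bool.false_eq_true,
          ite_false, ih]

-- ===== VERDICT (by name: the statement is the Claim_ definition above) =====
theorem match_property_spec : Claim_equal_match_property := by
  intro key props _
  unfold Spec_match_property match_property match_property_alt
  rw [matchPropLoopA_eq]
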